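-- pv_equiv track=rewrite | github.com/Givikap/leetcode | easy/3798_largest_even_number/solution.py | largestEven
-- ===== SOURCE A (Python) =====
-- from collections import deque
--
-- def largestEven(s: str) -> str:
--     s_deque = deque(s)
--
--     while s_deque and s_deque[-1] != "2":
--         if s_deque[-1] == "1":
--             s_deque.pop()
--         else:
--             s_deque.popleft()
--
--     return "".join(s_deque)
-- ===== SOURCE B (Python) =====
-- def largestEven(s: str) -> str:
--     t = s.rstrip('1')
--     return t if t and t[-1] == '2' else ''
-- ===== Notes on version B (the rewrite author's own statement) =====
-- stated objective: simpler
-- what changed: Replaces the deque while-loop popping one character at a time with a closed form: one rstrip of trailing '1' characters plus a single guard on the last character.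
import Mathlib
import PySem

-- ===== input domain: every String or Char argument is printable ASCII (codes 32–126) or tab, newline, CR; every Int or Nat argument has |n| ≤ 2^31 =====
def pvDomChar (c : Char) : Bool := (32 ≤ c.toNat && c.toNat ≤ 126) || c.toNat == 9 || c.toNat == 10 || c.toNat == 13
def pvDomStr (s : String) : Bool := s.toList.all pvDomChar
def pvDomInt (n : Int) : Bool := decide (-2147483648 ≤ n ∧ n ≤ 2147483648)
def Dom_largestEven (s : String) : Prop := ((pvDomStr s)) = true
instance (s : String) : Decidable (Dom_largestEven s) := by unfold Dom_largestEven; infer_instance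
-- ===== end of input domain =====

-- B replaces A's deque-popping loop with a closed form: strip trailing '1's, then one guard on the last char (objective: simpler).

-- ===== PORT A =====
-- the while loop over the deque (as a List Char), step for step
def largestEvenLoop (l : List Char) : List Char :=
  if h : l = [] then l
  else if l.getLast h ≠ '2' then
    if l.getLast h = '1' then largestEvenLoop l.dropLast
    else largestEvenLoop l.tail
  else l
termination_by l.length
decreasing_by
  · simp [List.length_dropLast]; exact List.length_pos_iff.mpr h
  · simp [List.length_tail]; exact List.length_pos_iff.mpr h

def largestEven (s : String) : String := String.ofList (largestEvenLoop s.toList)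

-- ===== PORT B =====
-- s.rstrip('1') on the character list
def rstripOnes (l : List Char) : List Char := (l.reverse.dropWhile (· = '1')).reverse

def largestEven_alt (s : String) : String :=
  let t := rstripOnes s.toList
  if t.getLast? = some '2' then String.ofList t else ""

-- ===== PRECONDITION & SPEC =====
def Spec_largestEven (s : String) (out : String) : Prop := out = largestEven_alt s
instance (s : String) (out : String) : Decidable (Spec_largestEven s out) := by unfold Spec_largestEven; infer_instance

-- ===== CLAIM (what is proved, stated in full; the proofs are below) =====
def Claim_equal_largestEven : Prop := ∀ (s : String), Dom_largestEven s → Spec_largestEven s (largestEven s)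

-- ===== LEMMAS AND PROOFS =====

-- if the last char is not '1', rstrip('1') strips nothing
theorem rstripOnes_of_getLast_ne (l : List Char) (c : Char) (h : l.getLast? = some c)
    (hc : c ≠ '1') : rstripOnes l = l := by
  have hne : l ≠ [] := by intro e; simp [e] at h
  have hrev : l.reverse = c :: l.dropLast.reverse := by
    conv_lhs => rw [← List.dropLast_append_getLast hne]
    rw [List.getLast?_eq_some_getLast hne] at h
    simp [List.reverse_append, Option.some.inj h]
  unfold rstripOnes
  rw [hrev, List.dropWhile_cons_of_neg (by simpa using hc), ← hrev, List.reverse_reverse]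

-- if the last char is '1', rstrip('1') ignores it
theorem rstripOnes_dropLast (l : List Char) (h : l ≠ []) (h1 : l.getLast h = '1') :
    rstripOnes l = rstripOnes l.dropLast := by
  have hrev : l.reverse = '1' :: l.dropLast.reverse := by
    conv_lhs => rw [← List.dropLast_append_getLast h]
    simp [List.reverse_append, h1]
  unfold rstripOnes
  rw [hrev, List.dropWhile_cons_of_pos (by simp)]

-- B's closed form, on lists
def altList (l : List Char) : List Char :=
  if (rstripOnes l).getLast? = some '2' then rstripOnes l else []

-- the loop of A equals B's closed form
theorem loop_eq_alt (l : List Char) : largestEvenLoop l = altList l := by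
  induction l using largestEvenLoop.induct with
  | case1 =>
    simp [largestEvenLoop, altList, rstripOnes]
  | case2 l h h2 h1 ih =>
    rw [largestEvenLoop]
    simp only [dif_neg h, if_pos h2, if_pos h1]
    rw [ih, altList, altList, rstripOnes_dropLast l h h1]
  | case3 l h h2 h1 ih =>
    -- last char is neither '2' nor '1': both sides are []
    rw [largestEvenLoop]
    simp only [dif_neg h, if_pos h2, if_neg h1]
    have hlast : l.getLast? = some (l.getLast h) := List.getLast?_eq_some_getLast h
    have hboth : ∀ (m : List Char) (c : Char), m.getLast? = some c → c ≠ '1' → c ≠ '2' →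
        altList m = [] := by
      intro m c hm hc1 hc2
      unfold altList
      rw [rstripOnes_of_getLast_ne m c hm hc1, hm]
      simp [hc2]
    have hA : altList l = [] := hboth l _ hlast h1 (by simpa using h2)
    have hT : altList l.tail = [] := by
      match l, h with
      | [a], _ => simp [altList, rstripOnes]
      | a :: b :: rest, _ =>
        have htl : (b :: rest).getLast? = some ((a :: b :: rest).getLast (by simp)) := by
          rw [List.getLast?_eq_some_getLast (by simp : b :: rest ≠ [])]
          simp [List.getLast_cons]
        simp only [List.tail_cons]
        exact hboth (b :: rest) _ htl
          (by simpa [List.getLast_cons] using h1)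
          (by simpa [List.getLast_cons] using h2)
    rw [ih, hT, hA]
  | case4 l h h2 =>
    rw [largestEvenLoop]
    simp only [dif_neg h, if_neg h2]
    rw [not_not] at h2
    have hlast : l.getLast? = some '2' := by
      rw [List.getLast?_eq_some_getLast h, h2]
    unfold altList
    rw [rstripOnes_of_getLast_ne l '2' hlast (by decide), hlast]
    simp

-- ===== VERDICT (by name: the statement is the Claim_ definition above) =====
theorem largestEven_spec : Claim_equal_largestEven := by
  intro s _
  show largestEven s = largestEven_alt s
  unfold largestEven largestEven_alt
  rw [loop_eq_alt, altList]
  by_cases hc : (rstripOnes s.toList).getLast? = some '2'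
  · simp [hc]
  · simp only [hc, if_false]
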